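-- pv_equiv track=rewrite | github.com/xiaolutang/remote-control | server/app/services/assistant_planner.py | _is_dangerous_command
-- ===== SOURCE A (Python) =====
-- def _is_dangerous_command(command: str) -> bool:
--     normalized = command.lower()
--     blocked_patterns = [
--         "rm -rf /",
--         "sudo ",
--         "shutdown",
--         "reboot",
--         "mkfs",
--         "dd if=",
--         ":(){",
--     ]
--     return any(pattern in normalized for pattern in blocked_patterns)
-- ===== SOURCE B (Python) =====
-- # Hand-written single-pass multi-pattern scanner: walk the lowered command once,
-- # dispatching at each position on the current character through a first-char table,
-- # instead of running a separate substring scan for each blocked pattern.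
-- _DISPATCH = {
--     "r": ("rm -rf /", "reboot"),
--     "s": ("sudo ", "shutdown"),
--     "m": ("mkfs",),
--     "d": ("dd if=",),
--     ":": (":(){",),
-- }
--
-- def _is_dangerous_command(command: str) -> bool:
--     s = command.lower()
--     for i, ch in enumerate(s):
--         for p in _DISPATCH.get(ch, ()):
--             if s.startswith(p, i):
--                 return True
--     return False
-- ===== Notes on version B (the rewrite author's own statement) =====
-- stated objective: alternative
-- what changed: Replaces A's k independent whole-string substring scans (any(p in s)) with one hand-written left-to-right pass over the lowered command that, at each position, dispatches on the current character through a first-char table and only tries the patterns filed under that character.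
import Mathlib
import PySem

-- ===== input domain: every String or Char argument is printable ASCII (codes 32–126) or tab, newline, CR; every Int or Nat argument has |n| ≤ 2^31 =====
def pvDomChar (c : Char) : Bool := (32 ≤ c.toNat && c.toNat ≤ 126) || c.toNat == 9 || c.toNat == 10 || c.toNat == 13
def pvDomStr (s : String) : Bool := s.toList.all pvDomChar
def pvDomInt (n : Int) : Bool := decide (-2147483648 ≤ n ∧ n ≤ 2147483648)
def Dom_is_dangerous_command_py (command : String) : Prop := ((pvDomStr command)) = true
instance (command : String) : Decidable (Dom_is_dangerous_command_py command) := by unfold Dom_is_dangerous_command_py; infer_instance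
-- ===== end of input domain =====

-- B replaces A's k separate whole-string substring scans by ONE left-to-right pass
-- that dispatches at each position on the current character through a first-char table.

-- ===== PORT A =====
-- the blocked pattern list, as in A
def pvBlockedPatterns : List String :=
  ["rm -rf /", "sudo ", "shutdown", "reboot", "mkfs", "dd if=", ":(){"]

def is_dangerous_command_py (command : String) : Bool :=
  let normalized := PySem.Str.lower command
  pvBlockedPatterns.any (fun pattern => PySem.Str.isIn pattern normalized)

-- ===== PORT B =====
-- B's first-character dispatch table (_DISPATCH in Source B), patterns as char lists
def pvDispatch : List (Char × List (List Char)) :=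
  [('r', ["rm -rf /".toList, "reboot".toList]),
   ('s', ["sudo ".toList, "shutdown".toList]),
   ('m', ["mkfs".toList]),
   ('d', ["dd if=".toList]),
   (':', [":(){".toList])]

-- B's single pass: at each position, try only the patterns filed under the current char
def pvScan : List Char → Bool
  | [] => false
  | c :: rest =>
      ((pvDispatch.lookup c).getD []).any (fun p => p.isPrefixOf (c :: rest)) || pvScan rest

def is_dangerous_command_py_alt (command : String) : Bool :=
  pvScan (PySem.Chars.lower command.toList)

-- ===== PRECONDITION & SPEC =====
def Spec_is_dangerous_command_py (command : String) (out : Bool) : Prop := out = is_dangerous_command_py_alt command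
instance (command : String) (out : Bool) : Decidable (Spec_is_dangerous_command_py command out) := by unfold Spec_is_dangerous_command_py; infer_instance

-- ===== CLAIM (what is proved, stated in full; the proofs are below) =====
def Claim_equal_is_dangerous_command_py : Prop := ∀ (command : String), Dom_is_dangerous_command_py command → Spec_is_dangerous_command_py command (is_dangerous_command_py command)

-- ===== LEMMAS AND PROOFS =====

-- all patterns, as char lists (proof-side view of A's list)
def pvPats : List (List Char) := pvBlockedPatterns.map String.toList

-- the per-position bucket check equals checking all patterns at that position
lemma pvBucket_check (c : Char) (rest : List Char) :
    ((pvDispatch.lookup c).getD []).any (fun p => p.isPrefixOf (c :: rest))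
      = pvPats.any (fun p => p.isPrefixOf (c :: rest)) := by
  by_cases h1 : c = 'r'
  · subst h1; simp [pvDispatch, pvPats, pvBlockedPatterns, List.isPrefixOf]
  by_cases h2 : c = 's'
  · subst h2; simp [pvDispatch, pvPats, pvBlockedPatterns, List.lookup, List.isPrefixOf]
  by_cases h3 : c = 'm'
  · subst h3; simp [pvDispatch, pvPats, pvBlockedPatterns, List.lookup, List.isPrefixOf]
  by_cases h4 : c = 'd'
  · subst h4; simp [pvDispatch, pvPats, pvBlockedPatterns, List.lookup, List.isPrefixOf]
  by_cases h5 : c = ':'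
  · subst h5; simp [pvDispatch, pvPats, pvBlockedPatterns, List.lookup, List.isPrefixOf]
  have e1 : (c == 'r') = false := by simpa using h1
  have f1 : ('r' == c) = false := by simpa using Ne.symm h1
  have e2 : (c == 's') = false := by simpa using h2
  have f2 : ('s' == c) = false := by simpa using Ne.symm h2
  have e3 : (c == 'm') = false := by simpa using h3
  have f3 : ('m' == c) = false := by simpa using Ne.symm h3
  have e4 : (c == 'd') = false := by simpa using h4
  have f4 : ('d' == c) = false := by simpa using Ne.symm h4
  have e5 : (c == ':') = false := by simpa using h5
  have f5 : (':' == c) = false := by simpa using Ne.symm h5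
  simp [pvDispatch, pvPats, pvBlockedPatterns, List.lookup, List.isPrefixOf,
    e1, f1, e2, f2, e3, f3, e4, f4, e5, f5]

lemma pvScan_iff (l : List Char) :
    pvScan l = true ↔ ∃ p ∈ pvPats, ∃ j, p <+: l.drop j := by
  induction l with
  | nil =>
    simp only [pvScan]
    refine iff_of_false (by decide) ?_
    rintro ⟨p, hp, j, hpre⟩
    have hpnil : p = [] := List.prefix_nil.mp (by simpa using hpre)
    subst hpnil
    revert hp; decide
  | cons c rest ih =>
    simp only [pvScan, pvBucket_check, Bool.or_eq_true, List.any_eq_true,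
      List.isPrefixOf_iff_prefix, ih]
    constructor
    · rintro (⟨p, hp, hpre⟩ | ⟨p, hp, j, hpre⟩)
      · exact ⟨p, hp, 0, by simpa using hpre⟩
      · exact ⟨p, hp, j + 1, by simpa using hpre⟩
    · rintro ⟨p, hp, j, hpre⟩
      cases j with
      | zero => exact Or.inl ⟨p, hp, by simpa using hpre⟩
      | succ j => exact Or.inr ⟨p, hp, j, hpre⟩

lemma pvScan_iff_infix (l : List Char) :
    pvScan l = true ↔ ∃ p ∈ pvPats, p <:+: l := by
  rw [pvScan_iff]
  refine exists_congr fun p => and_congr_right fun _ => ?_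
  constructor
  · rintro ⟨j, hpre⟩
    exact hpre.isInfix.trans (List.drop_suffix j l).isInfix
  · intro h
    rw [← PySem.Chars.isIn_iff_infix] at h
    exact (PySem.Chars.exists_prefix_drop_iff_isIn p l).2 h

-- ===== VERDICT (by name: the statement is the Claim_ definition above) =====
theorem is_dangerous_command_py_spec : Claim_equal_is_dangerous_command_py := by
  intro command _
  unfold Spec_is_dangerous_command_py is_dangerous_command_py is_dangerous_command_py_alt
  rw [Bool.eq_iff_iff, List.any_eq_true, pvScan_iff_infix]
  simp only [PySem.Str.isIn_iff_infix, PySem.Str.toList_lower]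
  constructor
  · rintro ⟨p, hp, h⟩
    refine ⟨p.toList, ?_, h⟩
    simp only [pvPats, List.mem_map]
    exact ⟨p, hp, rfl⟩
  · rintro ⟨p, hp, h⟩
    simp only [pvPats, List.mem_map] at hp
    obtain ⟨q, hq, rfl⟩ := hp
    exact ⟨q, hq, h⟩
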